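-- pv_equiv track=rewrite | github.com/meyersbs/developer-apologies | src/apologies.py | _countNonApologies
-- ===== SOURCE A (Python) =====
-- NON_APOLOGY_LEMMA_PHRASES = [
--     # Apologize
--     ["not", "apologize"],
--     ["n't", "apologize"], # i.e. "won't apologize"
--     # Apologise
--     ["not", "apologise"],
--     ["n't", "apologise"], # i.e. "won't apologise"
--     # Blame
--     ["git", "blame"],
--     ["n't", "blame"], # i.e. "can't blame"
--     ["not", "to", "blame"],
--     # Fault
--     ["seg", "fault"],
--     ["segmentation", "fault"],
--     ["page", "fault"],
--     ["permission", "fault"],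
--     ["protection", "fault"],
--     ["not", "-PRON-", "fault"], # i.e. "not my/our/your/his/her/their fault"
--     # Mistake
--     ["not", "a", "mistake"],
--     # Mistaken
--     ["not", "mistaken"], # i.e. "if I am not mistaken"
--     # Regret
--     ["n't", "regret"], # i.e. "won't regret"
--     # Sorry
--     ["better", "safe", "than", "sorry"],
--     ["not", "sorry"],
-- ]
--
-- def _countNonApologies(lemmas):
--     """
--     Count the occurrences of non apology lemma phrases.
--
--     GIVEN:
--       lemmas (list -- list of lemmatized text
--
--     RETURN:
--       num_non_apologies -- number of occurrences of non apology lemma phrases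
--     """
--     num_non_apologies = 0
--     for non_apology in NON_APOLOGY_LEMMA_PHRASES:
--         num_non_apologies += len(
--             [
--                 # Read this starting with the second line: For each sublist of lemmas with
--                 # length == len(non_apology), if the sublist == non_apology, append non_apology
--                 # to the list. The length of the final list is the number of occurences of
--                 # non_apology in lemmas.
--                 non_apology for i in range(len(lemmas))
--                 if lemmas[i : i + len(non_apology)] == non_apology
--             ]
--         )
--
--     return num_non_apologies
-- ===== SOURCE B (Python) =====
-- NON_APOLOGY_LEMMA_PHRASES = [
--     ["not", "apologize"],
--     ["n't", "apologize"],
--     ["not", "apologise"],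
--     ["n't", "apologise"],
--     ["git", "blame"],
--     ["n't", "blame"],
--     ["not", "to", "blame"],
--     ["seg", "fault"],
--     ["segmentation", "fault"],
--     ["page", "fault"],
--     ["permission", "fault"],
--     ["protection", "fault"],
--     ["not", "-PRON-", "fault"],
--     ["not", "a", "mistake"],
--     ["not", "mistaken"],
--     ["n't", "regret"],
--     ["better", "safe", "than", "sorry"],
--     ["not", "sorry"],
-- ]
--
-- # Prefix index built once: first token -> phrases starting with it.
-- _PREFIX_INDEX = {}
-- for _phrase in NON_APOLOGY_LEMMA_PHRASES:
--     _PREFIX_INDEX.setdefault(_phrase[0], []).append(_phrase)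
--
--
-- def _countNonApologies(lemmas):
--     total = 0
--     for i, token in enumerate(lemmas):
--         for phrase in _PREFIX_INDEX.get(token, []):
--             if lemmas[i:i + len(phrase)] == phrase:
--                 total += 1
--     return total
-- ===== Notes on version B (the rewrite author's own statement) =====
-- stated objective: faster
-- what changed: Replaces 18 phrase-major full scans of the token list by one position-major pass driven by a prefix index (first token -> candidate phrases) built once at module level.
import Mathlib
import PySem

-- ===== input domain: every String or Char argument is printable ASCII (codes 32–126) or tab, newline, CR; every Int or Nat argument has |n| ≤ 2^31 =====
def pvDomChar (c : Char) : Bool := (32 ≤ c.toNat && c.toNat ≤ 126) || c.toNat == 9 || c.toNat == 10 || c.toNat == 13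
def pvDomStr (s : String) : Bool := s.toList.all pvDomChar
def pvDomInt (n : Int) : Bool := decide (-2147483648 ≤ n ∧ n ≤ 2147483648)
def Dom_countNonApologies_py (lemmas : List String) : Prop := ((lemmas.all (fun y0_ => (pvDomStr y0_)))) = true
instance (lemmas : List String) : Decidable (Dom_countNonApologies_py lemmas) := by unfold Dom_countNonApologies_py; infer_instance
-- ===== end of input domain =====

-- B replaces A's 18 phrase-major scans by one position-major pass over the tokens with a
-- prefix index (first token -> candidate phrases); objective: faster (constant factor).

-- NON_APOLOGY_LEMMA_PHRASES (module-level constant shared by both implementations)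
def pvPhrases : List (List String) :=
  [ ["not", "apologize"],
    ["n't", "apologize"],
    ["not", "apologise"],
    ["n't", "apologise"],
    ["git", "blame"],
    ["n't", "blame"],
    ["not", "to", "blame"],
    ["seg", "fault"],
    ["segmentation", "fault"],
    ["page", "fault"],
    ["permission", "fault"],
    ["protection", "fault"],
    ["not", "-PRON-", "fault"],
    ["not", "a", "mistake"],
    ["not", "mistaken"],
    ["n't", "regret"],
    ["better", "safe", "than", "sorry"],
    ["not", "sorry"] ]

-- ===== PORT A =====
def countNonApologies_py (lemmas : List String) : Int :=
  pvPhrases.foldl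
    (fun num_non_apologies non_apology =>
      num_non_apologies +
        ((((PySem.List.pyRange 0 (PySem.List.len lemmas) 1).filter
              (fun i => PySem.List.slice lemmas (some i) (some (i + PySem.List.len non_apology))
                          == non_apology)).map (fun _ => non_apology)).length : Int))
    0

-- ===== PORT B =====
-- _PREFIX_INDEX: first token -> phrases starting with it (phrase[0] ported as headD "": every phrase is nonempty)
def pvPrefixIndex : PySem.Dict String (List (List String)) :=
  pvPhrases.foldl
    (fun d phrase => d.insert (phrase.headD "") (d.getD (phrase.headD "") [] ++ [phrase]))
    PySem.Dict.empty

def countNonApologies_py_alt (lemmas : List String) : Int :=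
  (PySem.List.enumerate lemmas).foldl
    (fun total it =>
      (pvPrefixIndex.getD it.2 []).foldl
        (fun t phrase =>
          if PySem.List.slice lemmas (some it.1) (some (it.1 + PySem.List.len phrase)) == phrase
          then t + 1 else t)
        total)
    0

-- ===== PRECONDITION & SPEC =====
def Spec_countNonApologies_py (lemmas : List String) (out : Int) : Prop := out = countNonApologies_py_alt lemmas
instance (lemmas : List String) (out : Int) : Decidable (Spec_countNonApologies_py lemmas out) := by unfold Spec_countNonApologies_py; infer_instance

-- ===== CLAIM (what is proved, stated in full; the proofs are below) =====
def Claim_equal_countNonApologies_py : Prop := ∀ (lemmas : List String), Dom_countNonApologies_py lemmas → Spec_countNonApologies_py lemmas (countNonApologies_py lemmas)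

-- ===== LEMMAS AND PROOFS =====

-- 0/1 indicator of phrase p matching at position j (shared shape of both ports' tests)
def pvInd (xs : List String) (j : Int) (p : List String) : Int :=
  if PySem.List.slice xs (some j) (some (j + PySem.List.len p)) == p then 1 else 0

-- generic exchange of the two summation orders
theorem pv_sum_sum_comm {α β : Type} (P : List α) (R : List β) (f : β → α → Int) :
    (P.map (fun p => (R.map (fun j => f j p)).sum)).sum
      = (R.map (fun j => (P.map (fun p => f j p)).sum)).sum := by
  induction P with
  | nil => simp
  | cons p rest ih =>
      simp only [List.map_cons, List.sum_cons, List.map_cons]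
      rw [ih, ← PySem.List.sum_map_add_int]

-- A is the phrase-major double sum of indicators
theorem pv_A_eq (xs : List String) :
    countNonApologies_py xs
      = (pvPhrases.map (fun p =>
          ((PySem.List.pyRange 0 (PySem.List.len xs) 1).map (fun j => pvInd xs j p)).sum)).sum := by
  simp only [countNonApologies_py]
  rw [PySem.List.foldl_add, zero_add]
  refine congrArg List.sum (List.map_congr_left fun p _ => ?_)
  rw [List.length_map, ← List.countP_eq_length_filter,
      ← PySem.List.sum_map_ite_one_zero
        (fun i => PySem.List.slice xs (some i) (some (i + PySem.List.len p)) == p)]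
  rfl

-- a match at j forces the phrase's first token to be the token at j
theorem pv_head_of_match (xs : List String) (j : Int) (h0 : 0 ≤ j) (hn : j < (xs.length : Int))
    (q : String) (r : List String)
    (h : PySem.List.slice xs (some j) (some (j + PySem.List.len (q :: r))) = q :: r) :
    PySem.List.pyGetD xs j "" = q := by
  rw [PySem.List.slice_toNat xs h0 (by have := PySem.List.len_eq (q :: r); omega)] at h
  have hjn : j.toNat < xs.length := by omega
  have hlen : (j + PySem.List.len (q :: r)).toNat - j.toNat = r.length + 1 := by
    rw [PySem.List.len_eq]; simp only [List.length_cons]; omega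
  rw [hlen, List.drop_eq_getElem_cons hjn, List.take_succ_cons, List.cons.injEq] at h
  rw [PySem.List.pyGetD_eq_getElem xs "" h0 hn, h.1]

-- the prefix index looked up at tok is exactly the phrases whose first token is tok
theorem pv_cand_eq_filter (tok : String) :
    pvPrefixIndex.getD tok [] = pvPhrases.filter (fun p => p.headD "" == tok) := by
  have hidx : pvPrefixIndex = PySem.Dict.mk
      [("not", [["not","apologize"],["not","apologise"],["not","to","blame"],["not","-PRON-","fault"],["not","a","mistake"],["not","mistaken"],["not","sorry"]]),
       ("n't", [["n't","apologize"],["n't","apologise"],["n't","blame"],["n't","regret"]]),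
       ("git", [["git","blame"]]),
       ("seg", [["seg","fault"]]),
       ("segmentation", [["segmentation","fault"]]),
       ("page", [["page","fault"]]),
       ("permission", [["permission","fault"]]),
       ("protection", [["protection","fault"]]),
       ("better", [["better","safe","than","sorry"]])] := by decide
  by_cases h1 : tok = "not";          · subst h1; decide
  by_cases h2 : tok = "n't";          · subst h2; decide
  by_cases h3 : tok = "git";          · subst h3; decide
  by_cases h4 : tok = "seg";          · subst h4; decide
  by_cases h5 : tok = "segmentation"; · subst h5; decide
  by_cases h6 : tok = "page";         · subst h6; decide
  by_cases h7 : tok = "permission";   · subst h7; decide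
  by_cases h8 : tok = "protection";   · subst h8; decide
  by_cases h9 : tok = "better";       · subst h9; decide
  have hb1 : (("not" : String) == tok) = false := beq_eq_false_iff_ne.mpr (Ne.symm h1)
  have hb2 : (("n't" : String) == tok) = false := beq_eq_false_iff_ne.mpr (Ne.symm h2)
  have hb3 : (("git" : String) == tok) = false := beq_eq_false_iff_ne.mpr (Ne.symm h3)
  have hb4 : (("seg" : String) == tok) = false := beq_eq_false_iff_ne.mpr (Ne.symm h4)
  have hb5 : (("segmentation" : String) == tok) = false := beq_eq_false_iff_ne.mpr (Ne.symm h5)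
  have hb6 : (("page" : String) == tok) = false := beq_eq_false_iff_ne.mpr (Ne.symm h6)
  have hb7 : (("permission" : String) == tok) = false := beq_eq_false_iff_ne.mpr (Ne.symm h7)
  have hb8 : (("protection" : String) == tok) = false := beq_eq_false_iff_ne.mpr (Ne.symm h8)
  have hb9 : (("better" : String) == tok) = false := beq_eq_false_iff_ne.mpr (Ne.symm h9)
  rw [hidx]
  simp [PySem.Dict.getD, pvPhrases, PySem.Dict.get?,
        hb1, hb2, hb3, hb4, hb5, hb6, hb7, hb8, hb9]

-- per-position: summing over the candidate bucket equals summing over all phrases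
theorem pv_pointwise (xs : List String) (j : Int) (h0 : 0 ≤ j) (hn : j < (xs.length : Int)) :
    (((pvPrefixIndex.getD (PySem.List.pyGetD xs j "") []).countP
        (fun p => PySem.List.slice xs (some j) (some (j + PySem.List.len p)) == p) : Nat) : Int)
      = (pvPhrases.map (fun p => pvInd xs j p)).sum := by
  rw [pv_cand_eq_filter, List.countP_filter, ← PySem.List.sum_map_ite_one_zero]
  have hcongr : ∀ p ∈ pvPhrases,
      ((PySem.List.slice xs (some j) (some (j + PySem.List.len p)) == p)
        && (p.headD "" == PySem.List.pyGetD xs j "")) = true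
      ↔ (PySem.List.slice xs (some j) (some (j + PySem.List.len p)) == p) = true := by
    intro p hp
    constructor
    · intro h; exact (Bool.and_eq_true_iff.mp h).1
    · intro h
      have hne : p ≠ [] := by revert hp; simp [pvPhrases]; rintro (rfl|rfl|rfl|rfl|rfl|rfl|rfl|rfl|rfl|rfl|rfl|rfl|rfl|rfl|rfl|rfl|rfl|rfl) <;> simp
      obtain ⟨q, r, rfl⟩ := List.exists_cons_of_ne_nil hne
      refine Bool.and_eq_true_iff.mpr ⟨h, ?_⟩
      have := pv_head_of_match xs j h0 hn q r (beq_iff_eq.mp h)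
      simp [this]
  refine congrArg List.sum (List.map_congr_left fun p hp => ?_)
  simp only [pvInd]
  by_cases h : (PySem.List.slice xs (some j) (some (j + PySem.List.len p)) == p) = true
  · rw [if_pos ((hcongr p hp).mpr h), if_pos h]
  · rw [if_neg (fun hc => h ((hcongr p hp).mp hc)), if_neg h]

-- B is the position-major double sum of indicators
theorem pv_B_eq (xs : List String) :
    countNonApologies_py_alt xs
      = ((PySem.List.pyRange 0 (PySem.List.len xs) 1).map (fun j =>
          (pvPhrases.map (fun p => pvInd xs j p)).sum)).sum := by
  simp only [countNonApologies_py_alt]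
  rw [PySem.List.enumerate_eq_map_pyRange xs "", List.foldl_map]
  rw [PySem.List.foldl_congr_mem _ _
        (fun total j => total + (pvPhrases.map (fun p => pvInd xs j p)).sum) 0
        (fun total j hj => by
          rw [PySem.List.foldl_if_add_one]
          have hj' := PySem.List.mem_pyRange_one.mp hj
          rw [pv_pointwise xs j hj'.1 (by have := PySem.List.len_eq xs; omega)])]
  rw [PySem.List.foldl_add, zero_add]

-- ===== VERDICT (by name: the statement is the Claim_ definition above) =====
theorem countNonApologies_py_spec : Claim_equal_countNonApologies_py := by
  intro xs _
  unfold Spec_countNonApologies_py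
  rw [pv_A_eq, pv_B_eq, pv_sum_sum_comm]
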